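-- pv_equiv track=rewrite | github.com/pypi-data/pypi-mirror-112 | packages/yuan-tool/yuan-tool-1.55.tar.gz/yuan-tool-1.55/yuantool/database/mongodb_obj.py | save_change
-- ===== SOURCE A (Python) =====
-- def save_change(d, m='|'):
--     """
--     清洗变量d，将其中所有字典key的'.'变为'|'（或自定义m）
--     """
--     if not isinstance(d, dict):
--         pass
--     else:
--         _point_to_m(d, m)
--         for key in list(d):
--             save_change(d[key])
--     return d
--
-- def _point_to_m(t: dict, m='|'):
--     for key in list(t):
--         if '.' in key:
--             nk = str(key).replace('.', m)
--             t[nk] = t.pop(key)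
--     return t
-- ===== SOURCE B (Python) =====
-- def save_change(d, m='|'):
--     """
--     Clean d: replace '.' in its keys with m. Batch form: take a snapshot of the
--     dotted keys, pop them all, then re-add the renamed pairs in one update.
--     (Values here are plain strings, so the original's recursion into dict
--     values never does anything; non-dict input is returned unchanged.)
--     """
--     if not isinstance(d, dict):
--         return d
--     dotted = [k for k in d if '.' in k]
--     moved = [(k.replace('.', m), d.pop(k)) for k in dotted]
--     d.update(moved)
--     return d
-- ===== Notes on version B (the rewrite author's own statement) =====
-- stated objective: simpler
-- what changed: A pops and reinserts each dotted key one at a time inside a loop over a snapshot of all keys (plus a recursion into values that is a no-op on string values); B snapshots only the dotted keys, pops them all, and re-adds all renamed pairs with a single dict.update.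
import Mathlib
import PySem

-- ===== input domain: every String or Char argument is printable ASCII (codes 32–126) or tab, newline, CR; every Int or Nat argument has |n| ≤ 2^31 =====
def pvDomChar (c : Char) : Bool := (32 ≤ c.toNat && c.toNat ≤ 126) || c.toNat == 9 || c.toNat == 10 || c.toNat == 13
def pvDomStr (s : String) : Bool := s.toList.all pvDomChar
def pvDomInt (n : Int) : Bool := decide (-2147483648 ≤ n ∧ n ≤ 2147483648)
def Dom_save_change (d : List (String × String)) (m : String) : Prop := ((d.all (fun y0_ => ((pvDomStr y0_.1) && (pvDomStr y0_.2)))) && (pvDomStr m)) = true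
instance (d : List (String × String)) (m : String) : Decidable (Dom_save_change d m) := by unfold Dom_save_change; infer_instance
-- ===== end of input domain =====

-- B replaces A's one-at-a-time pop/reinsert loop by a batch pass (snapshot dotted keys,
-- pop them all, one dict.update with the renamed pairs): simpler, same return value.
-- Both A and B mutate the dict argument in place; the equivalence proved here is about
-- the RETURN value (on this flat string-valued domain A's recursion into values is a no-op).

-- ===== PORT A =====
-- helper _point_to_m(t, m): for key in list(t): if '.' in key: t[nk] = t.pop(key)
def pointToM (t : PySem.Dict String String) (m : String) : PySem.Dict String String :=
  t.keys.foldl (fun acc key =>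
    if PySem.Str.isIn "." key then
      match acc.get? key with
      | some v => (acc.erase key).insert (PySem.Str.replace key "." m) v
      | none => acc  -- t.pop(key): KeyError unreachable, the snapshot key is still present
    else acc) t

def save_change (d : List (String × String)) (m : String) : List (String × String) :=
  -- d is a dict here, so: _point_to_m(d, m); then `for key in list(d): save_change(d[key])`
  -- recurses into the string values, which are not dicts, so that loop changes nothing.
  (pointToM (PySem.Dict.mk d) m).items

-- ===== PORT B =====
def save_change_alt (d : List (String × String)) (m : String) : List (String × String) :=
  let t := PySem.Dict.mk d
  let dotted := t.keys.filter (fun k => PySem.Str.isIn "." k)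
  let moved := dotted.map (fun k => (PySem.Str.replace k "." m, t.getD k ""))
  let popped := dotted.foldl (fun acc k => acc.erase k) t
  (popped.update moved).items

-- ===== PRECONDITION & SPEC =====
-- The argument is a Python dict, so Pre_ requires distinct keys; Pre_ also excludes dicts in
-- which some renamed key ('.' -> m) coincides with a DIFFERENT '.'-containing key (only possible
-- when m itself contains '.'), where A's overwrite-then-re-rename cascade order is accidental.
def Pre_save_change (d : List (String × String)) (m : String) : Prop :=
  (d.map Prod.fst).Nodup ∧
  (∀ k ∈ (d.map Prod.fst).filter (fun k => PySem.Str.isIn "." k),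
    ∀ k' ∈ (d.map Prod.fst).filter (fun k => PySem.Str.isIn "." k),
      k ≠ k' → PySem.Str.replace k "." m ≠ k')
instance (d : List (String × String)) (m : String) : Decidable (Pre_save_change d m) := by
  unfold Pre_save_change; infer_instance

def pvWitness_save_change : (List (String × String)) × String := ([("a.b", "1"), ("c", "2")], "|")

def Spec_save_change (d : List (String × String)) (m : String) (out : List (String × String)) : Prop := out = save_change_alt d m
instance (d : List (String × String)) (m : String) (out : List (String × String)) : Decidable (Spec_save_change d m out) := by unfold Spec_save_change; infer_instance

-- ===== CLAIM (what is proved, stated in full; the proofs are below) =====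
def Claim_equal_save_change : Prop := ∀ (d : List (String × String)) (m : String), Dom_save_change d m → Pre_save_change d m → Spec_save_change d m (save_change d m)

-- ===== LEMMAS AND PROOFS =====

theorem pv_find?_keyeq_filter (l : List (String × String)) (j k : String) (h : j ≠ k) :
    (l.filter (fun p => !(p.1 == j))).find? (fun p => p.1 == k) = l.find? (fun p => p.1 == k) := by
  induction l with
  | nil => rfl
  | cons p t ih =>
    by_cases hj : p.1 = j <;> by_cases hk : p.1 = k
    · exact absurd (hj ▸ hk) h
    · simp [hj, ih, h]
    · simp [hk, Ne.symm h]
    · simp [hj, hk, ih]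

theorem pv_get?_erase_of_ne (d : PySem.Dict String String) (j k : String) (h : j ≠ k) :
    (d.erase j).get? k = d.get? k := by
  simp only [PySem.Dict.get?, PySem.Dict.erase, pv_find?_keyeq_filter d.items j k h]

theorem pv_getD_erase_of_ne (d : PySem.Dict String String) (j k : String) (v0 : String) (h : j ≠ k) :
    (d.erase j).getD k v0 = d.getD k v0 := by
  simp only [PySem.Dict.getD, pv_get?_erase_of_ne d j k h]

theorem pv_contains_erase_of_ne (d : PySem.Dict String String) (j k : String) (h : j ≠ k) :
    (d.erase j).contains k = d.contains k := by
  rw [PySem.Dict.contains_eq_isSome_get?, PySem.Dict.contains_eq_isSome_get?,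
    pv_get?_erase_of_ne d j k h]

theorem pv_erase_insert_comm (d : PySem.Dict String String) (j k : String) (v : String)
    (h : j ≠ k) : (d.insert k v).erase j = (d.erase j).insert k v := by
  apply PySem.Dict.ext
  have hcE := pv_contains_erase_of_ne d j k h
  have hitemsE : ∀ (x : PySem.Dict String String), (x.erase j).items
      = x.items.filter (fun p => !(p.1 == j)) := fun _ => rfl
  by_cases hc : d.contains k = true
  · have hc' : (d.erase j).contains k = true := by rw [hcE]; exact hc
    rw [hitemsE, PySem.Dict.items_insert_of_contains _ v hc,
      PySem.Dict.items_insert_of_contains _ v hc', hitemsE, List.filter_map]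
    have hcg : ∀ p ∈ d.items,
        ((fun p => !(p.1 == j)) ∘ (fun p => if (p.1 == k) = true then (k, v) else p)) p
          = (fun (p : String × String) => !(p.1 == j)) p := by
      intro p _
      by_cases hpk : p.1 = k
      · simp [hpk]
      · simp [hpk]
    rw [List.filter_congr hcg]
  · have hc' : (d.erase j).contains k = false := by
      rw [hcE]; simpa using hc
    rw [hitemsE, PySem.Dict.items_insert_of_not_contains _ v (by simpa using hc),
      PySem.Dict.items_insert_of_not_contains _ v (by simpa using hc'), hitemsE,
      List.filter_append]
    simp [Ne.symm h]

theorem pv_foldl_erase_insert_comm (D : List String) (t : PySem.Dict String String)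
    (nk : String) (v : String) (h : ∀ j ∈ D, j ≠ nk) :
    D.foldl (fun acc k => acc.erase k) (t.insert nk v)
      = (D.foldl (fun acc k => acc.erase k) t).insert nk v := by
  induction D generalizing t with
  | nil => rfl
  | cons j D' ih =>
    simp only [List.foldl_cons]
    rw [pv_erase_insert_comm t j nk v (h j (List.mem_cons_self))]
    exact ih (t.erase j) (fun x hx => h x (List.mem_cons_of_mem _ hx))

-- the heart: A's interleaved pop/reinsert fold over the dotted keys equals
-- B's "erase them all, then one update with the renamed pairs"
theorem pv_batch_eq (m : String) (D : List String) (t : PySem.Dict String String)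
    (hsub : ∀ k ∈ D, t.contains k = true) (hnd : D.Nodup)
    (h4 : ∀ k ∈ D, ∀ k' ∈ D, k ≠ k' → PySem.Str.replace k "." m ≠ k') :
    D.foldl (fun acc key =>
        match acc.get? key with
        | some v => (acc.erase key).insert (PySem.Str.replace key "." m) v
        | none => acc) t
      = PySem.Dict.update (D.foldl (fun acc k => acc.erase k) t)
          (D.map (fun k => (PySem.Str.replace k "." m, t.getD k ""))) := by
  induction D generalizing t with
  | nil => rfl
  | cons k D' ih =>
    have hkD' : k ∉ D' := (List.nodup_cons.mp hnd).1
    have hnd' : D'.Nodup := (List.nodup_cons.mp hnd).2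
    have hck : t.contains k = true := hsub k List.mem_cons_self
    obtain ⟨v, hv⟩ : ∃ v, t.get? k = some v := by
      rw [PySem.Dict.contains_eq_isSome_get?] at hck
      exact Option.isSome_iff_exists.mp hck
    have hgetD : t.getD k "" = v := PySem.Dict.getD_of_get?_eq_some t "" hv
    have hnkD' : ∀ j ∈ D', j ≠ PySem.Str.replace k "." m := by
      intro j hj
      exact fun hje => (h4 k List.mem_cons_self j (List.mem_cons_of_mem _ hj)
        (fun he => hkD' (he ▸ hj))) hje.symm
    -- the dict after A's first step
    set t1 : PySem.Dict String String := (t.erase k).insert (PySem.Str.replace k "." m) v with ht1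
    have hsub1 : ∀ k' ∈ D', t1.contains k' = true := by
      intro k' hk'
      have hkk' : k ≠ k' := fun he => hkD' (he ▸ hk')
      rw [ht1, PySem.Dict.contains_insert, pv_contains_erase_of_ne t k k' hkk',
        hsub k' (List.mem_cons_of_mem _ hk'), Bool.or_true]
    have hmap : D'.map (fun j => (PySem.Str.replace j "." m, t1.getD j ""))
        = D'.map (fun j => (PySem.Str.replace j "." m, t.getD j "")) := by
      apply List.map_congr_left
      intro j hj
      have hkj : k ≠ j := fun he => hkD' (he ▸ hj)
      rw [ht1, PySem.Dict.getD_insert_of_ne _ v "" (hnkD' j hj),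
        pv_getD_erase_of_ne t k j "" hkj]
    have hfold : D'.foldl (fun acc j => acc.erase j) t1
        = (D'.foldl (fun acc j => acc.erase j) (t.erase k)).insert (PySem.Str.replace k "." m) v :=
      pv_foldl_erase_insert_comm D' (t.erase k) _ v hnkD'
    have h4' : ∀ a ∈ D', ∀ b ∈ D', a ≠ b → PySem.Str.replace a "." m ≠ b := by
      intro a ha b hb
      exact h4 a (List.mem_cons_of_mem _ ha) b (List.mem_cons_of_mem _ hb)
    calc (k :: D').foldl (fun acc key =>
            match acc.get? key with
            | some v => (acc.erase key).insert (PySem.Str.replace key "." m) v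
            | none => acc) t
        = D'.foldl (fun acc key =>
            match acc.get? key with
            | some v => (acc.erase key).insert (PySem.Str.replace key "." m) v
            | none => acc) t1 := by
          simp only [List.foldl_cons, hv, ht1]
      _ = PySem.Dict.update (D'.foldl (fun acc j => acc.erase j) t1)
            (D'.map (fun j => (PySem.Str.replace j "." m, t1.getD j ""))) :=
          ih t1 hsub1 hnd' h4'
      _ = PySem.Dict.update ((k :: D').foldl (fun acc j => acc.erase j) t)
            ((k :: D').map (fun j => (PySem.Str.replace j "." m, t.getD j ""))) := by
          rw [hmap, hfold]
          simp only [PySem.Dict.update, List.map_cons, List.foldl_cons, hgetD]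

theorem pv_contains_of_mem_keys (d : PySem.Dict String String) (k : String)
    (h : k ∈ d.keys) : d.contains k = true := by
  simp only [PySem.Dict.keys, List.mem_map] at h
  obtain ⟨p, hp, hpk⟩ := h
  simp only [PySem.Dict.contains, List.any_eq_true]
  exact ⟨p, hp, by simp [hpk]⟩

-- ===== VERDICT (by name: the statement is the Claim_ definition above) =====
theorem save_change_spec : Claim_equal_save_change := by
  intro d m _ hpre
  obtain ⟨hnd, h4⟩ := hpre
  unfold Spec_save_change save_change save_change_alt pointToM
  have hkeys : (PySem.Dict.mk d).keys = d.map Prod.fst := rfl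
  rw [PySem.List.foldl_if_eq_foldl_filter]
  congr 1
  apply pv_batch_eq
  · intro k hk
    exact pv_contains_of_mem_keys _ k (List.mem_of_mem_filter hk)
  · exact List.Nodup.filter _ (hkeys ▸ hnd)
  · exact fun k hk k' hk' => h4 k (hkeys ▸ hk) k' (hkeys ▸ hk')
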